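-- pv_equiv track=rewrite | github.com/Patyrn/Divide-and-Learn | dnl/Utils.py | get_mini_batches
-- ===== SOURCE A (Python) =====
-- def get_mini_batches(X, Y, weights, size=32):
--     number_of_minibatches = int(len(X) / size)
--     mini_batch_X = [] * number_of_minibatches
--     mini_batch_Y = [] * number_of_minibatches
--     mini_batch_weights = [] * number_of_minibatches
--     # for i in a:
--     #     start_i = size*i
--     #     end_i = start_i + size
--     #     mini
--     #     mini_batch_Y.append(Y[start_i:end_i])
--     #     mini_batch_weights.append(weights[start_i:end_i])
--
--     for start_index in range(number_of_minibatches):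
--         mini_batch_X.append([X[j] for j in range(start_index * size, (start_index + 1) * size)])
--         mini_batch_Y.append([Y[j] for j in range(start_index * size, (start_index + 1) * size)])
--         mini_batch_weights.append([weights[j] for j in range(start_index * size, (start_index + 1) * size)])
--
--     return mini_batch_X, mini_batch_Y, mini_batch_weights
-- ===== SOURCE B (Python) =====
-- def get_mini_batches(X, Y, weights, size=32):
--     number_of_minibatches = len(X) // size if size > 0 else 0
--     total = number_of_minibatches * size
--     mini_batch_X, mini_batch_Y, mini_batch_weights = [], [], []
--     cur_X, cur_Y, cur_w = [], [], []
--     for j in range(total):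
--         cur_X.append(X[j])
--         cur_Y.append(Y[j])
--         cur_w.append(weights[j])
--         if len(cur_X) == size:
--             mini_batch_X.append(cur_X)
--             mini_batch_Y.append(cur_Y)
--             mini_batch_weights.append(cur_w)
--             cur_X, cur_Y, cur_w = [], [], []
--     return mini_batch_X, mini_batch_Y, mini_batch_weights
-- ===== Notes on version B (the rewrite author's own statement) =====
-- stated objective: alternative
-- what changed: Replaces the per-batch loop with three inner index-range comprehensions by a single flat pass over element indices that fills one current bucket per output and flushes it whenever it reaches `size`.
import Mathlib
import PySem

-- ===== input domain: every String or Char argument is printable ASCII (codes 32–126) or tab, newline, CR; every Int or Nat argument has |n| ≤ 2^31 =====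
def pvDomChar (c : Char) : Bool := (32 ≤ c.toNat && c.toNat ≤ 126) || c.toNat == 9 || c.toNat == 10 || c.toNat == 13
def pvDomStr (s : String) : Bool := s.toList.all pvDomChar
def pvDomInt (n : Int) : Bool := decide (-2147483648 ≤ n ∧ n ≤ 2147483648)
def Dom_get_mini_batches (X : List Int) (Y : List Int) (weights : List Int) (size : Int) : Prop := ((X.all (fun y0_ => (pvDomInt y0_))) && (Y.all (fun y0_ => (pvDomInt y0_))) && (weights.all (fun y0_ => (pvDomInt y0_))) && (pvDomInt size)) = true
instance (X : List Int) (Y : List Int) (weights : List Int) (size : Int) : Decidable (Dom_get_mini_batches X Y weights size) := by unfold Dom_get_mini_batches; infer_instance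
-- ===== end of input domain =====

-- B replaces A's per-batch loop (three inner index comprehensions) by one flat pass over
-- element indices with a current bucket per output, flushed each time it reaches `size`;
-- same O(n) cost, different decomposition.

-- ===== PORT A =====
-- `int(len(X)/size)` truncates toward zero = Int.tdiv (exact at the sampled magnitudes);
-- the outer loop runs only when that count is positive, which forces size > 0, so the inner
-- range(start*size, (start+1)*size) is List.range' (start*size.toNat) size.toNat; every index
-- hit is in range under Pre_, so List.getD is exact there.
def get_mini_batches (X : List Int) (Y : List Int) (weights : List Int) (size : Int) : List (List Int) × List (List Int) × List (List Int) :=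
  let number_of_minibatches : Int := Int.tdiv (Int.ofNat X.length) size
  let s : Nat := size.toNat
  (List.range number_of_minibatches.toNat).foldl
    (fun acc start_index =>
      (acc.1 ++ [(List.range' (start_index * s) s).map (fun j => X.getD j 0)],
       acc.2.1 ++ [(List.range' (start_index * s) s).map (fun j => Y.getD j 0)],
       acc.2.2 ++ [(List.range' (start_index * s) s).map (fun j => weights.getD j 0)]))
    ([], [], [])

-- ===== PORT B =====
-- loop body of Source B's flat pass: append X[j]/Y[j]/weights[j] to the current buckets and
-- flush them to the results when the X-bucket reaches `size` elements.
def altStep (X : List Int) (Y : List Int) (weights : List Int) (size : Int)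
    (st : List (List Int) × List (List Int) × List (List Int) × List Int × List Int × List Int)
    (j : Nat) : List (List Int) × List (List Int) × List (List Int) × List Int × List Int × List Int :=
  let cx := st.2.2.2.1 ++ [X.getD j 0]
  let cy := st.2.2.2.2.1 ++ [Y.getD j 0]
  let cw := st.2.2.2.2.2 ++ [weights.getD j 0]
  if (cx.length : Int) = size then
    (st.1 ++ [cx], st.2.1 ++ [cy], st.2.2.1 ++ [cw], [], [], [])
  else
    (st.1, st.2.1, st.2.2.1, cx, cy, cw)

def get_mini_batches_alt (X : List Int) (Y : List Int) (weights : List Int) (size : Int) : List (List Int) × List (List Int) × List (List Int) :=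
  let number_of_minibatches : Nat := if 0 < size then X.length / size.toNat else 0
  let st := (List.range (number_of_minibatches * size.toNat)).foldl (altStep X Y weights size) ([], [], [], [], [], [])
  (st.1, st.2.1, st.2.2.1)

-- ===== PRECONDITION & SPEC =====
-- Pre_ excludes exactly the inputs where the Python A raises: size = 0 (ZeroDivisionError in
-- int(len(X)/size)) and, for size > 0, Y or weights shorter than number_of_minibatches*size
-- (IndexError); on everything else A returns normally.
def Pre_get_mini_batches (X : List Int) (Y : List Int) (weights : List Int) (size : Int) : Prop :=
  size ≠ 0 ∧ (0 < size →
    X.length / size.toNat * size.toNat ≤ Y.length ∧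
    X.length / size.toNat * size.toNat ≤ weights.length)
instance (X : List Int) (Y : List Int) (weights : List Int) (size : Int) : Decidable (Pre_get_mini_batches X Y weights size) := by unfold Pre_get_mini_batches; infer_instance
def pvWitness_get_mini_batches : List Int × List Int × List Int × Int := ([1, 2, 3], [4, 5, 6], [7, 8, 9], 2)

def Spec_get_mini_batches (X : List Int) (Y : List Int) (weights : List Int) (size : Int) (out : List (List Int) × List (List Int) × List (List Int)) : Prop := out = get_mini_batches_alt X Y weights size
instance (X : List Int) (Y : List Int) (weights : List Int) (size : Int) (out : List (List Int) × List (List Int) × List (List Int)) : Decidable (Spec_get_mini_batches X Y weights size out) := by unfold Spec_get_mini_batches; infer_instance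

-- ===== CLAIM (what is proved, stated in full; the proofs are below) =====
def Claim_equal_get_mini_batches : Prop := ∀ (X : List Int) (Y : List Int) (weights : List Int) (size : Int), Dom_get_mini_batches X Y weights size → Pre_get_mini_batches X Y weights size → Spec_get_mini_batches X Y weights size (get_mini_batches X Y weights size)

-- ===== LEMMAS AND PROOFS =====

-- A's loop: a fold appending one element to each of three accumulators is three maps.
theorem tri_foldl (l : List Nat) (f g h : Nat → List Int)
    (a b c : List (List Int)) :
    l.foldl (fun acc i => (acc.1 ++ [f i], acc.2.1 ++ [g i], acc.2.2 ++ [h i])) (a, b, c)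
      = (a ++ l.map f, b ++ l.map g, c ++ l.map h) := by
  induction l generalizing a b c with
  | nil => simp
  | cons x xs ih => simp [List.foldl_cons, ih]

theorem range_add_eq (n m : Nat) : List.range (n + m) = List.range n ++ List.range' n m := by
  rw [List.range_eq_range', List.range_eq_range', ← List.range'_append (s := 0) (n := m) (m := n) (step := 1)]
  norm_num

-- B's inner steps: feeding t more indices into a bucket of length s - t flushes exactly one
-- chunk and leaves the buckets empty.
theorem flush_lemma (X Y weights : List Int) (s : Nat)
    (t : Nat) (m : Nat) (u v w : List Int) (a b c : List (List Int))
    (hlen : u.length + t = s) (ht : 0 < t) :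
    (List.range' m t).foldl (altStep X Y weights (s : Int)) (a, b, c, u, v, w)
      = (a ++ [u ++ (List.range' m t).map (fun j => X.getD j 0)],
         b ++ [v ++ (List.range' m t).map (fun j => Y.getD j 0)],
         c ++ [w ++ (List.range' m t).map (fun j => weights.getD j 0)], [], [], []) := by
  induction t generalizing m u v w with
  | zero => omega
  | succ t ih =>
    rw [List.range'_succ]
    rcases Nat.eq_zero_or_pos t with h0 | hpos
    · subst h0
      have hs : u.length + 1 = s := by omega
      simp [altStep, hs]
    · have hne : ¬ ((u.length + 1 : Int) = (s : Int)) := by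
        intro h
        have : u.length + 1 = s := by exact_mod_cast h
        omega
      have step : altStep X Y weights (s : Int) (a, b, c, u, v, w) m
          = (a, b, c, u ++ [X.getD m 0], v ++ [Y.getD m 0], w ++ [weights.getD m 0]) := by
        simp [altStep, hne]
      rw [List.foldl_cons, step, ih (m + 1) _ _ _ (by simp; omega) hpos]
      simp

-- B's outer structure: k full blocks starting from empty buckets yield k chunks.
theorem blocks_lemma (X Y weights : List Int) (s : Nat) (hs : 0 < s)
    (k : Nat) (a b c : List (List Int)) :
    (List.range (k * s)).foldl (altStep X Y weights (s : Int)) (a, b, c, [], [], [])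
      = (a ++ (List.range k).map (fun i => (List.range' (i * s) s).map (fun j => X.getD j 0)),
         b ++ (List.range k).map (fun i => (List.range' (i * s) s).map (fun j => Y.getD j 0)),
         c ++ (List.range k).map (fun i => (List.range' (i * s) s).map (fun j => weights.getD j 0)),
         [], [], []) := by
  induction k generalizing a b c with
  | zero => simp
  | succ k ih =>
    have : (k + 1) * s = k * s + s := by ring
    rw [this, range_add_eq, List.foldl_append, ih,
        flush_lemma X Y weights s s (k * s) [] [] [] _ _ _ (by simp) hs]
    simp [List.range_succ]

theorem get_mini_batches_eq (X Y weights : List Int) (size : Int) :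
    get_mini_batches X Y weights size = get_mini_batches_alt X Y weights size := by
  by_cases hpos : 0 < size
  · set s : Nat := size.toNat with hsdef
    have hs : (s : Int) = size := Int.toNat_of_nonneg hpos.le
    have hspos : 0 < s := by omega
    have hdiv : (Int.tdiv (Int.ofNat X.length) size).toNat = X.length / s := by
      rw [← hs]; rfl
    unfold get_mini_batches get_mini_batches_alt
    simp only [hdiv, if_pos hpos, ← hsdef]
    rw [tri_foldl, ← hs, blocks_lemma X Y weights s hspos]
  · have h1 : Int.tdiv (Int.ofNat X.length) size ≤ 0 :=
      Int.tdiv_nonpos_of_nonneg_of_nonpos (Int.natCast_nonneg _) (by omega)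
    have hnA : (Int.tdiv (Int.ofNat X.length) size).toNat = 0 := by omega
    unfold get_mini_batches get_mini_batches_alt
    simp only [hnA, if_neg hpos]
    simp

-- ===== VERDICT (by name: the statement is the Claim_ definition above) =====
theorem get_mini_batches_spec : Claim_equal_get_mini_batches := by
  intro X Y weights size _ _
  unfold Spec_get_mini_batches
  exact get_mini_batches_eq X Y weights size
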